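-- pv_equiv track=rewrite | github.com/acabelloj/gh-inspector | gh_inspector/src/commands/find_codeowners.py | aggregate_by_owner
-- ===== SOURCE A (Python) =====
-- from collections import defaultdict
--
-- def aggregate_by_owner(
--     results: list[tuple[str, list[tuple[str, list[str]]]]],
-- ) -> dict[str, list[tuple[str, list[str]]]]:
--     """Invert per-repo entries to per-owner: {owner: [(repo, [patterns])]}."""
--     owner_map: dict[str, dict[str, list[str]]] = defaultdict(lambda: defaultdict(list))
--     for repo_name, entries in results:
--         for pattern, owners in entries:
--             for owner in owners:
--                 owner_map[owner][repo_name].append(pattern)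
--     return {owner: sorted(repos.items()) for owner, repos in sorted(owner_map.items())}
-- ===== SOURCE B (Python) =====
-- def aggregate_by_owner(results):
--     """Invert per-repo entries to per-owner: {owner: [(repo, [patterns])]}."""
--     owners = sorted({o for _, entries in results for _, os in entries for o in os})
--     return {
--         o: [
--             (r, [p for rn, entries in results if rn == r
--                    for p, os in entries for oo in os if oo == o])
--             for r in sorted({rn for rn, entries in results
--                                 for _, os in entries for oo in os if oo == o})
--         ]
--         for o in owners
--     }
-- ===== Notes on version B (the rewrite author's own statement) =====
-- stated objective: alternative
-- what changed: Replaces A's one-pass nested-defaultdict index (then sorting its items) with an index-free staged computation: build the sorted owner set once, and for each owner compute its sorted repo set and re-scan the input per (owner, repo) to collect that pair's patterns by comprehension.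
import Mathlib
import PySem

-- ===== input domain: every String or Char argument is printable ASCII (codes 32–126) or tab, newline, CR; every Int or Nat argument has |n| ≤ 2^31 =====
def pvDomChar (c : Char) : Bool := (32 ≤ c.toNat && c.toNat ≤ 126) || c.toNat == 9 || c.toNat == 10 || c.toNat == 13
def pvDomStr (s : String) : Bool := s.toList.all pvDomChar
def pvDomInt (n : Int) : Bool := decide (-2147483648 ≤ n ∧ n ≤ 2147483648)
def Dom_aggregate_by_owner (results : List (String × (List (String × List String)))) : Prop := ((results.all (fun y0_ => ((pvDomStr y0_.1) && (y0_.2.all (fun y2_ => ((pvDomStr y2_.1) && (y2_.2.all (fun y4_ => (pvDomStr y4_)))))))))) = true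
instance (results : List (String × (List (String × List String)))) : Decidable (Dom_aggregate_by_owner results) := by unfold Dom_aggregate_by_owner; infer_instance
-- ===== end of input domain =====

-- B drops A's dict-of-dicts index entirely: it computes the sorted owner set once and then, for
-- each owner and each of that owner's sorted repos, rescans the input to collect the patterns
-- (objective: alternative — staged repeated scans instead of a one-pass hash index; not faster).

-- ===== PORT A =====
-- Python A's sorted(...) on (str, dict)/(str, list) tuples: the first components are distinct dict
-- keys, so Python never compares the second components; sorting by the first component is exact.
def aggregate_by_owner (results : List (String × (List (String × List String)))) : List (String × List (String × List String)) :=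
  (PySem.List.sorted
      (results.foldl (fun m rp =>
        rp.2.foldl (fun m pe =>
          pe.2.foldl (fun m owner =>
            m.modify owner PySem.Dict.empty (fun inner => inner.modify rp.1 [] (· ++ [pe.1]))) m) m)
        (PySem.Dict.empty : PySem.Dict String (PySem.Dict String (List String)))).items
      (fun kv => kv.1) false).map
    (fun kv => (kv.1, PySem.List.sorted kv.2.items (fun rv => rv.1) false))

-- ===== PORT B =====
-- owners = sorted({o for _, entries in results for _, os in entries for o in os})
-- {o: [(r, [p for rn, entries in results if rn == r for p, os in entries for oo in os if oo == o])
--      for r in sorted({rn for rn, entries in results for _, os in entries for oo in os if oo == o})]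
--  for o in owners}
-- (set comprehensions are PySem.Set.ofList of the generated list; the dict is built in sorted-owner
-- order, so its association list is exactly this map)
def aggregate_by_owner_alt (results : List (String × (List (String × List String)))) : List (String × List (String × List String)) :=
  (PySem.List.sorted
      (PySem.Set.ofList (results.flatMap (fun rp => rp.2.flatMap (fun pe => pe.2))))
      (fun x => x) false).map
    (fun o =>
      (o,
        (PySem.List.sorted
            (PySem.Set.ofList (results.flatMap (fun rp =>
              rp.2.flatMap (fun pe => (pe.2.filter (fun oo => oo == o)).map (fun _ => rp.1)))))
            (fun x => x) false).map
          (fun r =>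
            (r, (results.filter (fun rp => rp.1 == r)).flatMap (fun rp =>
                  rp.2.flatMap (fun pe => (pe.2.filter (fun oo => oo == o)).map (fun _ => pe.1)))))))

-- ===== PRECONDITION & SPEC =====
def Spec_aggregate_by_owner (results : List (String × (List (String × List String)))) (out : List (String × List (String × List String))) : Prop := out = aggregate_by_owner_alt results
instance (results : List (String × (List (String × List String)))) (out : List (String × List (String × List String))) : Decidable (Spec_aggregate_by_owner results out) := by unfold Spec_aggregate_by_owner; infer_instance

-- ===== CLAIM (what is proved, stated in full; the proofs are below) =====
def Claim_equal_aggregate_by_owner : Prop := ∀ (results : List (String × (List (String × List String)))), Dom_aggregate_by_owner results → Spec_aggregate_by_owner results (aggregate_by_owner results)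

-- ===== LEMMAS AND PROOFS =====

-- the flattened (owner, repo, pattern) triples of the input, in iteration order
def pvTriples (results : List (String × (List (String × List String)))) : List (String × String × String) :=
  results.flatMap (fun rp => rp.2.flatMap (fun pe => pe.2.map (fun owner => (owner, rp.1, pe.1))))

-- the canonical comprehension form both ports are reduced to
def pvCanon (results : List (String × (List (String × List String)))) : List (String × List (String × List String)) :=
  (PySem.List.sorted (PySem.Set.ofList ((pvTriples results).map (fun t => t.1))) (fun x => x) false).map
    (fun owner =>
      (owner,
        (PySem.List.sorted (PySem.Set.ofList (((pvTriples results).filter (fun t => t.1 == owner)).map (fun t => t.2.1))) (fun x => x) false).map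
          (fun repo => (repo, ((pvTriples results).filter (fun t => t.1 == owner && t.2.1 == repo)).map (fun t => t.2.2)))))

-- the one-triple step of A's loop, seen over the flattened triple list
def pvStep (m : PySem.Dict String (PySem.Dict String (List String))) (t : String × String × String) : PySem.Dict String (PySem.Dict String (List String)) :=
  m.modify t.1 PySem.Dict.empty (fun inner => inner.modify t.2.1 [] (· ++ [t.2.2]))

-- the inner dict A accumulates for one owner, over the flattened list
def pvInner (l : List (String × String × String)) (o : String) : PySem.Dict String (List String) :=
  ((l.filter (fun t => t.1 == o)).map (fun t => t.2)).foldl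
    (fun inner rp => inner.modify rp.1 [] (· ++ [rp.2])) PySem.Dict.empty

-- A's inner two loops over one repo's entries = fold of pvStep over that repo's triples
theorem fold_entries (r : String) (entries : List (String × List String)) (m : PySem.Dict String (PySem.Dict String (List String))) :
    entries.foldl (fun m pe =>
      pe.2.foldl (fun m owner =>
        m.modify owner PySem.Dict.empty (fun inner => inner.modify r [] (· ++ [pe.1]))) m) m
    = (entries.flatMap (fun pe => pe.2.map (fun owner => (owner, r, pe.1)))).foldl pvStep m := by
  induction entries generalizing m with
  | nil => rfl
  | cons pe rest ih =>
    simp only [List.foldl_cons, List.flatMap_cons, List.foldl_append, List.foldl_map]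
    rw [ih]
    rfl

-- A's triple nested loop = fold of pvStep over pvTriples
theorem fold_triples (results : List (String × (List (String × List String)))) (m : PySem.Dict String (PySem.Dict String (List String))) :
    results.foldl (fun m rp =>
      rp.2.foldl (fun m pe =>
        pe.2.foldl (fun m owner =>
          m.modify owner PySem.Dict.empty (fun inner => inner.modify rp.1 [] (· ++ [pe.1]))) m) m) m
    = (pvTriples results).foldl pvStep m := by
  induction results generalizing m with
  | nil => rfl
  | cons rp rest ih =>
    simp only [List.foldl_cons]
    rw [ih, fold_entries]
    simp only [pvTriples, List.flatMap_cons, List.foldl_append]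

-- lookup through A's fold: the inner dict of owner o is the fold over o's pairs
theorem getD_fold_step (l : List (String × String × String)) (m : PySem.Dict String (PySem.Dict String (List String))) (o : String) :
    (l.foldl pvStep m).getD o PySem.Dict.empty
    = ((l.filter (fun t => t.1 == o)).map (fun t => t.2)).foldl
        (fun inner rp => inner.modify rp.1 [] (· ++ [rp.2])) (m.getD o PySem.Dict.empty) := by
  induction l generalizing m with
  | nil => rfl
  | cons t rest ih =>
    by_cases h : t.1 = o
    · simp [List.foldl_cons, ih, pvStep, h, PySem.Dict.getD_modify_self]
    · have h' : ¬ o = t.1 := fun hh => h hh.symm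
      simp [List.foldl_cons, ih, pvStep, h, PySem.Dict.getD_modify, h']

-- sorted-items of (Set.ofList xs).map (k ↦ (k, v k)) by first component, as a map over the sorted key set
theorem sorted_pairs {β : Type} (xs : List String) (v : String → β) :
    PySem.List.sorted ((PySem.Set.ofList xs).map (fun k => (k, v k))) (fun kv => kv.1) false
    = (PySem.List.sorted (PySem.Set.ofList xs) (fun x => x) false).map (fun k => (k, v k)) := by
  apply PySem.List.sorted_eq_of_perm_of_pairwise_lt
  · exact (PySem.List.sorted_perm _ _ _).map _
  · exact (PySem.List.sorted_ofList_pairwise_lt xs).map (fun k => (k, v k)) (fun a b h => h)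

-- the filtered pairs of owner o restricted to repo r, back on the triple list
theorem filter_pairs (l : List (String × String × String)) (o r : String) :
    ((l.filter (fun t => t.1 == o)).map (fun t => t.2)).filter (fun p => p.1 == r)
    = (l.filter (fun t => t.1 == o && t.2.1 == r)).map (fun t => t.2) := by
  simp [List.filter_map, List.filter_filter, Function.comp, Bool.and_comm]

-- sorted items of the inner dict of owner o = the canonical per-owner list
theorem inner_sorted (l : List (String × String × String)) (o : String) :
    PySem.List.sorted (pvInner l o).items (fun rv => rv.1) false
    = (PySem.List.sorted (PySem.Set.ofList ((l.filter (fun t => t.1 == o)).map (fun t => t.2.1))) (fun x => x) false).map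
        (fun r => (r, (l.filter (fun t => t.1 == o && t.2.1 == r)).map (fun t => t.2.2))) := by
  have hkeys : (pvInner l o).keys = PySem.Set.ofList ((l.filter (fun t => t.1 == o)).map (fun t => t.2.1)) := by
    have := PySem.Dict.keys_foldl_modify_key
      ((l.filter (fun t => t.1 == o)).map (fun t => t.2)) (fun p : String × String => p.1)
      [] (fun _ p => (· ++ [p.2])) (PySem.Dict.empty (κ := String) (ν := List String))
    simpa [pvInner, PySem.Set.update, PySem.Set.ofList, List.map_map, Function.comp] using this
  have hnd : (pvInner l o).keys.Nodup := by
    apply PySem.Dict.nodup_keys_foldl_modify_key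
      ((l.filter (fun t => t.1 == o)).map (fun t => t.2)) (fun p : String × String => p.1)
      [] (fun _ p => (· ++ [p.2]))
    simp [PySem.Dict.empty, PySem.Dict.keys]
  rw [PySem.Dict.items_eq_map_keys _ hnd [], hkeys, sorted_pairs]
  congr 1
  funext r
  have hget : (pvInner l o).getD r [] = (l.filter (fun t => t.1 == o && t.2.1 == r)).map (fun t => t.2.2) := by
    rw [pvInner, PySem.Dict.getD_foldl_modify_append, filter_pairs]
    simp [List.map_map, Function.comp]
  rw [hget]

-- A's port equals the canonical form
theorem a_eq_canon (results : List (String × (List (String × List String)))) :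
    aggregate_by_owner results = pvCanon results := by
  unfold aggregate_by_owner pvCanon
  rw [fold_triples]
  set l := pvTriples results with hl
  have hkeys : (l.foldl pvStep PySem.Dict.empty).keys = PySem.Set.ofList (l.map (fun t => t.1)) := by
    have := PySem.Dict.keys_foldl_modify_key l (fun t : String × String × String => t.1)
      PySem.Dict.empty (fun _ t => fun inner => inner.modify t.2.1 [] (· ++ [t.2.2]))
      (PySem.Dict.empty (κ := String) (ν := PySem.Dict String (List String)))
    simpa [pvStep, PySem.Set.update, PySem.Set.ofList] using this
  have hnd : (l.foldl pvStep PySem.Dict.empty).keys.Nodup := by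
    apply PySem.Dict.nodup_keys_foldl_modify_key l (fun t : String × String × String => t.1)
      PySem.Dict.empty (fun _ t => fun inner => inner.modify t.2.1 [] (· ++ [t.2.2]))
    simp [PySem.Dict.empty, PySem.Dict.keys]
  rw [PySem.Dict.items_eq_map_keys _ hnd PySem.Dict.empty, hkeys, sorted_pairs, List.map_map]
  congr 1
  funext o
  have hget : (l.foldl pvStep PySem.Dict.empty).getD o PySem.Dict.empty = pvInner l o := by
    rw [getD_fold_step]; rfl
  simp only [Function.comp, hget, inner_sorted]

-- B's owner universe = the triples' first projections
theorem owners_eq (results : List (String × (List (String × List String)))) :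
    (pvTriples results).map (fun t => t.1)
    = results.flatMap (fun rp => rp.2.flatMap (fun pe => pe.2)) := by
  simp [pvTriples, List.map_flatMap, List.map_map, Function.comp_def]

-- B's per-owner repo universe = the filtered triples' repo projections
theorem repos_eq (results : List (String × (List (String × List String)))) (o : String) :
    ((pvTriples results).filter (fun t => t.1 == o)).map (fun t => t.2.1)
    = results.flatMap (fun rp => rp.2.flatMap (fun pe => (pe.2.filter (fun oo => oo == o)).map (fun _ => rp.1))) := by
  simp [pvTriples, List.filter_flatMap, List.map_flatMap, List.filter_map, List.map_map, Function.comp_def]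

-- hoisting the repo test out of the flatMap: only matching result items contribute
theorem patterns_guard (results : List (String × (List (String × List String)))) (o r : String) :
    results.flatMap (fun rp => rp.2.flatMap (fun pe => (pe.2.filter (fun oo => oo == o && rp.1 == r)).map (fun _ => pe.1)))
    = (results.filter (fun rp => rp.1 == r)).flatMap (fun rp => rp.2.flatMap (fun pe => (pe.2.filter (fun oo => oo == o)).map (fun _ => pe.1))) := by
  induction results with
  | nil => rfl
  | cons rp rest ih =>
    simp only [] at ih
    by_cases h : rp.1 = r
    · simp at ih; simp [h, ih]
    · simp at ih; simp [h, ih]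

-- B's per-(owner, repo) pattern rescan = the filtered triples' pattern projections
theorem patterns_eq (results : List (String × (List (String × List String)))) (o r : String) :
    ((pvTriples results).filter (fun t => t.1 == o && t.2.1 == r)).map (fun t => t.2.2)
    = (results.filter (fun rp => rp.1 == r)).flatMap (fun rp => rp.2.flatMap (fun pe => (pe.2.filter (fun oo => oo == o)).map (fun _ => pe.1))) := by
  rw [← patterns_guard]
  simp [pvTriples, List.filter_flatMap, List.map_flatMap, List.filter_map, List.map_map, Function.comp_def]

-- B's port equals the canonical form
theorem b_eq_canon (results : List (String × (List (String × List String)))) :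
    aggregate_by_owner_alt results = pvCanon results := by
  unfold aggregate_by_owner_alt pvCanon
  rw [← owners_eq]
  congr 1
  funext o
  rw [← repos_eq]
  congr 2
  funext r
  rw [← patterns_eq]

-- ===== VERDICT (by name: the statement is the Claim_ definition above) =====
theorem aggregate_by_owner_spec : Claim_equal_aggregate_by_owner := by
  intro results _
  unfold Spec_aggregate_by_owner
  rw [a_eq_canon, b_eq_canon]
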